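-- pv_equiv track=rewrite | github.com/Thinato/memory_allocation | Program.py | update_temp
-- ===== SOURCE A (Python) =====
-- empty     = "_"
--
-- allocated = "X"
--
-- temp      = "T"
--
-- tempEmpty = "E"
--
-- def update_temp(m, x, y):
--     ## From temporary to allocated
--     spaces = 0
--     for i in range(y):
--         for j in range(x):
--             # Substitui os "E"'s ou tempEmpty por "_" ou empty
--             if m[i][j] == tempEmpty:
--                 m[i][j] = empty
--                 spaces+=1
--
--             # Substitui os "T"'s ou temp por "X" ou allocated
--             elif m[i][j] == temp:
--                 m[i][j] = allocated
--
--             # Conta o numero de espaços e retorna pela função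
--             elif m[i][j] == empty:
--                 spaces+=1
--     return spaces
-- ===== SOURCE B (Python) =====
-- empty     = "_"
-- allocated = "X"
-- temp      = "T"
-- tempEmpty = "E"
--
-- _TR = {tempEmpty: empty, temp: allocated}
--
-- def update_temp(m, x, y):
--     h, w = max(y, 0), max(x, 0)
--     # The cells that end up empty are exactly those that START as '_' or 'E',
--     # so the count is computed directly from the original subgrid, independent
--     # of the rewriting.
--     spaces = sum(c == empty or c == tempEmpty
--                  for row in m[:h] for c in row[:w])
--     # Normalize the subgrid in place via the translation table (E->_, T->X).
--     for row in m[:h]: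
--         row[:w] = [_TR.get(c, c) for c in row[:w]]
--     return spaces
-- ===== Notes on version B (the rewrite author's own statement) =====
-- stated objective: alternative
-- what changed: A interleaves substitution and counting in one nested index loop with a running counter and an if/elif chain; B computes the count up front directly from the ORIGINAL subgrid via the characterization 'final empties = cells that start as _ or E' (a flattened membership sum, no substitution involved) and then rewrites the subgrid in place with a translation dict, so the two concerns are fully decoupled. Pre_ excludes exactly the inputs where A raises IndexError (x > 0 with a row index below y out of range, or a row among the first y shorter than x); B clamps there.
import Mathlib
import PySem

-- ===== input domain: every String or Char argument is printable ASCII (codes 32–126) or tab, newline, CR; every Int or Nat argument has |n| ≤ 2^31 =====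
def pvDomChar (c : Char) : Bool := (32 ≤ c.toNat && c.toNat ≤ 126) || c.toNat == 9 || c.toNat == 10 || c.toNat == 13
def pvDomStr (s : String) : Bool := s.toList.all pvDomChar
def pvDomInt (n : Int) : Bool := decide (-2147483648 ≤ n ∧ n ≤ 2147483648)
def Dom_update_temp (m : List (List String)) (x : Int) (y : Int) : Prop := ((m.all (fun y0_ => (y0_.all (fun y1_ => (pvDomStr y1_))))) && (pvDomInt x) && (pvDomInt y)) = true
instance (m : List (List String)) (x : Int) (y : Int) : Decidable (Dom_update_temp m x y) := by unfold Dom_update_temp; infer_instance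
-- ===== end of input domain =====

-- B counts up front from the original subgrid ('_' or 'E' cells) and rewrites separately via a
-- translation table, instead of A's interleaved substitute-and-count loop (objective: alternative).
-- Both A and B mutate m in place identically on Pre_; the equivalence proved here is about the return value.

-- ===== PORT A =====
def update_temp (m : List (List String)) (x : Int) (y : Int) : Int :=
  ((PySem.List.pyRange 0 y 1).foldl (fun (st : List (List String) × Int) i =>
    (PySem.List.pyRange 0 x 1).foldl (fun (st : List (List String) × Int) j =>
      let c := PySem.List.pyGetD (PySem.List.pyGetD st.1 i []) j ""
      if c = "E" then
        (PySem.List.pySetD st.1 i (PySem.List.pySetD (PySem.List.pyGetD st.1 i []) j "_"), st.2 + 1)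
      else if c = "T" then
        (PySem.List.pySetD st.1 i (PySem.List.pySetD (PySem.List.pyGetD st.1 i []) j "X"), st.2)
      else if c = "_" then (st.1, st.2 + 1)
      else st) st) (m, 0)).2

-- ===== PORT B =====
-- Source B's count is a flattened generator sum over m[:h] × row[:w] of the membership test
-- (c == '_' or c == 'E'); the nonnegative slices m[:h], row[:w] are take (exact, clamped as in
-- Python). Source B's second pass only mutates m in place and does not affect the returned value,
-- so it has no counterpart in this return-value port.
def update_temp_alt (m : List (List String)) (x : Int) (y : Int) : Int :=
  let h := (max y 0).toNat
  let w := (max x 0).toNat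
  ((((m.take h).flatMap (fun row => row.take w)).countP
      (fun c => c == "_" || c == "E") : Nat) : Int)

-- ===== PRECONDITION & SPEC =====
-- Pre_ excludes exactly the inputs where A raises IndexError: x > 0 together with some row index below y out of range of m, or a row among the first y shorter than x.
def Pre_update_temp (m : List (List String)) (x : Int) (y : Int) : Prop :=
  x ≤ 0 ∨ (y ≤ (m.length : Int) ∧ ∀ r ∈ m.take y.toNat, x ≤ (r.length : Int))
instance (m : List (List String)) (x : Int) (y : Int) : Decidable (Pre_update_temp m x y) := by unfold Pre_update_temp; infer_instance

def pvWitness_update_temp : List (List String) × Int × Int := ([["E", "T"], ["_", "a"]], 2, 2)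

def Spec_update_temp (m : List (List String)) (x : Int) (y : Int) (out : Int) : Prop := out = update_temp_alt m x y
instance (m : List (List String)) (x : Int) (y : Int) (out : Int) : Decidable (Spec_update_temp m x y out) := by unfold Spec_update_temp; infer_instance

-- ===== CLAIM (what is proved, stated in full; the proofs are below) =====
def Claim_equal_update_temp : Prop := ∀ (m : List (List String)) (x : Int) (y : Int), Dom_update_temp m x y → Pre_update_temp m x y → Spec_update_temp m x y (update_temp m x y)

-- ===== LEMMAS AND PROOFS =====
-- pvNorm: A's per-cell substitution; pvMid f n l: first n elements of l rewritten by f (the shape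
-- of A's partially-processed grid/row); pvRowF: a fully processed row; pvCnt: the number of
-- '_'-or-'E' cells among the first xx cells of a row (B's characterization of A's count).
def pvNorm (c : String) : String := if c = "E" then "_" else if c = "T" then "X" else c
def pvMid {α : Type} (f : α → α) (n : Nat) (l : List α) : List α := (l.take n).map f ++ l.drop n
def pvRowF (xx : Nat) (row : List String) : List String := pvMid pvNorm xx row
def pvCnt (xx : Nat) (row : List String) : Int :=
  (((row.take xx).countP (fun c => c == "_" || c == "E") : Nat) : Int)

theorem pv_map_take_succ {α β : Type} (f : α → β) (l : List α) (n : Nat) (hn : n < l.length) :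
    (l.take (n+1)).map f = (l.take n).map f ++ [f l[n]] := by
  have h2 : n < (l.map f).length := by simpa using hn
  rw [List.map_take, List.map_take, List.take_add_one, List.getElem?_eq_getElem h2]
  simp

theorem pv_take_succ {α : Type} (l : List α) (n : Nat) (hn : n < l.length) :
    l.take (n+1) = l.take n ++ [l[n]] := by
  have := pv_map_take_succ id l n hn
  simpa using this

theorem pv_mid_len {α : Type} (f : α → α) (n : Nat) (l : List α) (hn : n ≤ l.length) :
    ((l.take n).map f).length = n := by
  rw [List.length_map, List.length_take]; omega

theorem pv_mid_set {α : Type} [Inhabited α] (f : α → α) (l : List α) (n : Nat)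
    (hn : n < l.length) (v : α) :
    (pvMid f n l).set n v = (l.take n).map f ++ v :: l.drop (n+1) := by
  rw [pvMid, List.set_append, pv_mid_len f n l (by omega)]
  simp only [Nat.sub_self, lt_irrefl]
  conv_lhs => rw [List.drop_eq_getElem_cons hn]
  rfl

theorem pv_mid_succ {α : Type} (f : α → α) (l : List α) (n : Nat) (hn : n < l.length) :
    pvMid f (n+1) l = (l.take n).map f ++ f l[n] :: l.drop (n+1) := by
  rw [pvMid, pv_map_take_succ f l n hn]
  simp

theorem pv_mid_getD {α : Type} (f : α → α) (l : List α) (n : Nat) (hn : n < l.length) (d : α) :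
    (pvMid f n l).getD n d = l[n] := by
  rw [pvMid, List.getD, List.getElem?_append_right (by rw [pv_mid_len f n l (by omega)]),
      pv_mid_len f n l (by omega)]
  simp [List.getElem?_drop, List.getElem?_eq_getElem hn]

theorem pv_cnt_succ (r : List String) (n : Nat) (hn : n < r.length) :
    pvCnt (n+1) r = pvCnt n r + (if r[n] = "_" ∨ r[n] = "E" then 1 else 0) := by
  rw [pvCnt, pvCnt, pv_take_succ r n hn, List.countP_append]
  by_cases h : r[n] = "_" ∨ r[n] = "E"
  · rcases h with h | h <;> simp [h, List.countP_cons]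
  · push_neg at h
    simp [List.countP_cons, h.1, h.2]

theorem pv_inner_nat (xx : Nat) :
    ∀ (g : List (List String)) (s : Int) (i : Nat) (hi : i < g.length)
      (hn : xx ≤ (g[i]).length),
    (PySem.List.pyRange 0 (xx : Int) 1).foldl (fun (st : List (List String) × Int) j =>
      let c := PySem.List.pyGetD (PySem.List.pyGetD st.1 (i : Int) []) j ""
      if c = "E" then
        (PySem.List.pySetD st.1 (i : Int) (PySem.List.pySetD (PySem.List.pyGetD st.1 (i : Int) []) j "_"), st.2 + 1)
      else if c = "T" then
        (PySem.List.pySetD st.1 (i : Int) (PySem.List.pySetD (PySem.List.pyGetD st.1 (i : Int) []) j "X"), st.2)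
      else if c = "_" then (st.1, st.2 + 1)
      else st) (g, s)
    = (g.set i (pvRowF xx (g[i])), s + pvCnt xx (g[i])) := by
  induction xx with
  | zero =>
    intro g s i hi hn
    simp [pvRowF, pvMid, pvCnt, List.set_getElem_self]
  | succ n ih =>
    intro g s i hi hn
    have hn' : n < (g[i]).length := by omega
    have hcast : ((n : Int) + 1) = ((n + 1 : Nat) : Int) := by push_cast; ring
    rw [← hcast, PySem.List.pyRange_one_succ_right (by positivity), List.foldl_append,
        ih g s i hi (by omega)]
    simp only [List.foldl_cons, List.foldl_nil]
    have hget1 : PySem.List.pyGetD (g.set i (pvRowF n (g[i]))) (i : Int) [] = pvRowF n (g[i]) := by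
      simp [List.getD, List.getElem?_set_self', List.getElem?_eq_getElem hi]
    have hget2 : PySem.List.pyGetD (pvRowF n (g[i])) (n : Int) "" = (g[i])[n] := by
      simp only [PySem.List.pyGetD_natCast]
      exact pv_mid_getD pvNorm _ n hn' ""
    simp only [hget1, hget2, PySem.List.pySetD_natCast]
    by_cases hE : (g[i])[n] = "E"
    · rw [if_pos hE]
      rw [pvRowF, pv_mid_set pvNorm _ n hn', List.set_set, pvRowF, pv_mid_succ pvNorm _ n hn',
          pv_cnt_succ _ n hn']
      simp [pvNorm, hE]
      ring
    · rw [if_neg hE]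
      by_cases hT : (g[i])[n] = "T"
      · rw [if_pos hT]
        rw [pvRowF, pv_mid_set pvNorm _ n hn', List.set_set, pvRowF, pv_mid_succ pvNorm _ n hn',
            pv_cnt_succ _ n hn']
        simp [pvNorm, hT]
      · rw [if_neg hT]
        have hrow : pvRowF (n+1) (g[i]) = pvRowF n (g[i]) := by
          rw [pvRowF, pv_mid_succ pvNorm _ n hn', pvRowF, pvMid]
          conv_rhs => rw [List.drop_eq_getElem_cons hn']
          simp [pvNorm, hE, hT]
        by_cases hU : (g[i])[n] = "_"
        · rw [if_pos hU]
          rw [hrow, pv_cnt_succ _ n hn']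
          simp [hE, hT, hU]
          ring
        · rw [if_neg hU]
          rw [hrow, pv_cnt_succ _ n hn']
          simp [hE, hT, hU]

theorem pv_outer (m : List (List String)) (x : Int) (xx : Nat)
    (hxx : ((xx : Int) = x ∨ (x ≤ 0 ∧ xx = 0))) (n : Nat) (hn : n ≤ m.length)
    (hrows : ∀ r ∈ m.take n, xx ≤ r.length) :
    (PySem.List.pyRange 0 (n : Int) 1).foldl (fun (st : List (List String) × Int) i =>
      (PySem.List.pyRange 0 x 1).foldl (fun (st : List (List String) × Int) j =>
        let c := PySem.List.pyGetD (PySem.List.pyGetD st.1 i []) j ""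
        if c = "E" then
          (PySem.List.pySetD st.1 i (PySem.List.pySetD (PySem.List.pyGetD st.1 i []) j "_"), st.2 + 1)
        else if c = "T" then
          (PySem.List.pySetD st.1 i (PySem.List.pySetD (PySem.List.pyGetD st.1 i []) j "X"), st.2)
        else if c = "_" then (st.1, st.2 + 1)
        else st) st) (m, 0)
    = (pvMid (pvRowF xx) n m, ((m.take n).map (pvCnt xx)).sum) := by
  have hr : PySem.List.pyRange 0 x 1 = PySem.List.pyRange 0 (xx : Int) 1 := by
    rcases hxx with h | ⟨h1, h2⟩
    · rw [h]
    · rw [h2, PySem.List.pyRange_one_eq_nil h1]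
      simp
  simp only [hr]
  induction n with
  | zero => simp [pvMid]
  | succ n ih =>
    have hn' : n < m.length := by omega
    have hcast : ((n : Int) + 1) = ((n + 1 : Nat) : Int) := by push_cast; ring
    rw [← hcast, PySem.List.pyRange_one_succ_right (by positivity), List.foldl_append,
        ih (by omega) (fun r hr' => hrows r (List.mem_of_mem_take (l := m.take (n+1)) (by rw [List.take_take, min_eq_left (by omega : n ≤ n+1)]; exact hr')))]
    simp only [List.foldl_cons, List.foldl_nil]
    have hGl : n < (pvMid (pvRowF xx) n m).length := by
      simp [pvMid]; omega
    have hGi : (pvMid (pvRowF xx) n m).getD n [] = m[n] := pv_mid_getD (pvRowF xx) m n hn' []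
    have hGi' : (pvMid (pvRowF xx) n m)[n]'hGl = m[n] := by
      rw [← hGi, List.getD, List.getElem?_eq_getElem hGl]
      rfl
    have hmem : m[n] ∈ m.take (n+1) := by
      have : (m.take (n+1))[n]'(by simp; omega) = m[n] := List.getElem_take
      rw [← this]
      exact List.getElem_mem _
    rw [pv_inner_nat xx _ _ n hGl (by rw [hGi']; exact hrows _ hmem)]
    rw [hGi']
    simp only [Prod.mk.injEq]
    refine ⟨?_, ?_⟩
    · rw [pv_mid_set (pvRowF xx) m n hn', pv_mid_succ (pvRowF xx) m n hn']
    · rw [pv_map_take_succ (pvCnt xx) m n hn']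
      simp

theorem pv_countP_flatMap {α β : Type} (f : α → List β) (p : β → Bool) (l : List α) :
    (l.flatMap f).countP p = (l.map (fun a => (f a).countP p)).sum := by
  induction l with
  | nil => rfl
  | cons a l ih => simp [List.flatMap_cons, List.countP_append, ih]

theorem pv_alt_eq (m : List (List String)) (x y : Int) :
    update_temp_alt m x y
    = ((m.take (max y 0).toNat).map (pvCnt (max x 0).toNat)).sum := by
  unfold update_temp_alt
  dsimp only
  rw [pv_countP_flatMap, Nat.cast_list_sum, List.map_map]
  rfl

theorem pv_foldl_const {α β : Type} (l : List β) (init : α) :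
    l.foldl (fun s (_ : β) => s) init = init := by
  induction l generalizing init with
  | nil => rfl
  | cons a l ih => simpa using ih init

theorem pv_main (m : List (List String)) (x : Int) (y : Int)
    (pre : Pre_update_temp m x y) : update_temp m x y = update_temp_alt m x y := by
  rw [pv_alt_eq]
  unfold update_temp
  have hyy : (max y 0).toNat = y.toNat := by omega
  by_cases hx0 : x ≤ 0
  · have hxx0 : (max x 0).toNat = 0 := by omega
    simp only [PySem.List.pyRange_one_eq_nil hx0, List.foldl_nil, pv_foldl_const,
      hxx0]
    have h1 : ∀ r ∈ m.take (max y 0).toNat, pvCnt 0 r = 0 := fun r _ => by simp [pvCnt]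
    rw [List.map_congr_left (g := fun _ => (0 : Int)) h1, List.map_const']
    simp
  · rcases pre with h | ⟨hylen, hrows⟩
    · omega
    have hxx : ((max x 0).toNat : Int) = x := by omega
    have hyn : (max y 0).toNat ≤ m.length := by omega
    have hy : PySem.List.pyRange 0 y 1 = PySem.List.pyRange 0 (((max y 0).toNat : Nat) : Int) 1 := by
      by_cases hy0 : 0 ≤ y
      · have : (((max y 0).toNat : Nat) : Int) = y := by omega
        rw [this]
      · rw [PySem.List.pyRange_one_eq_nil (by omega), PySem.List.pyRange_one_eq_nil (by omega)]
    have hrows' : ∀ r ∈ m.take (max y 0).toNat, (max x 0).toNat ≤ r.length := by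
      intro r hr
      have := hrows r (by rwa [hyy] at hr)
      omega
    rw [hy, pv_outer m x (max x 0).toNat (Or.inl hxx) (max y 0).toNat hyn hrows']

-- ===== VERDICT (by name: the statement is the Claim_ definition above) =====
theorem update_temp_spec : Claim_equal_update_temp := by
  intro m x y _ pre
  unfold Spec_update_temp
  exact pv_main m x y pre
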